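-- pv_equiv track=rewrite | github.com/jaypgopani05/Tops-Academy | Python/Assignment/Assignment -1/Python Program Files/Ans_41_Search_If_List_Contains_Sub-list.py | is_sublist_case_insensitive
-- ===== SOURCE A (Python) =====
-- def is_sublist_case_insensitive(main_list, sub_list):
--     # Convert both lists to lowercase versions for comparison
--     lower_main = [item.lower() for item in main_list]
--     lower_sub = [item.lower() for item in sub_list]
--
--     m, n = len(lower_main), len(lower_sub)
--
--     # Slide over main list to check for a matching sequence
--     for i in range(m - n + 1):
--         if lower_main[i:i+n] == lower_sub:
--             return True, i  # Return match found and position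
--     return False, -1  # Not found
-- ===== SOURCE B (Python) =====
-- def is_sublist_case_insensitive(main_list, sub_list):
--     # Rabin-Karp style search: keep a rolling fingerprint (sum of character
--     # codes) of the current window and only compare the window itself when
--     # the fingerprints agree.
--     main = [item.lower() for item in main_list]
--     sub = [item.lower() for item in sub_list]
--     m, n = len(main), len(sub)
--     fp = [sum(map(ord, item)) for item in main]
--     target = sum(sum(map(ord, item)) for item in sub)
--     window = sum(fp[:n])
--     for i in range(m - n + 1):
--         if window == target and main[i:i+n] == sub:
--             return True, i
--         if i + n < m:
--             window += fp[i + n] - fp[i]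
--     return False, -1
-- ===== Notes on version B (the rewrite author's own statement) =====
-- stated objective: alternative
-- what changed: Replaces A's slice comparison at every window by a Rabin-Karp style search: a rolling fingerprint (sum of character codes) of the current window is maintained in O(1) per shift and the window is compared element-wise only when the fingerprints agree.
import Mathlib
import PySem

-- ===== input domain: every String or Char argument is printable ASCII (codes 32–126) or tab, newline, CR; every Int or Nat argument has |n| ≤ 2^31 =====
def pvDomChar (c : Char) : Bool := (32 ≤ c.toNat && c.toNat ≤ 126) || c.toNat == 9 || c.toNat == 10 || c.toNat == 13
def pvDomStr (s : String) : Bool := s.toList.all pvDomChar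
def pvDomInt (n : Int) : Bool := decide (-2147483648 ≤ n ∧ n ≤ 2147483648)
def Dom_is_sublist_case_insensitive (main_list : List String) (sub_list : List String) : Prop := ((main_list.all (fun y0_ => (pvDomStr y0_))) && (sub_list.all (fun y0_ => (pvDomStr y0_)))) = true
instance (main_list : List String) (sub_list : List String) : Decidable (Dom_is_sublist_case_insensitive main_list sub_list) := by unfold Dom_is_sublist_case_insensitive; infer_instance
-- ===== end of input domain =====

-- B replaces the per-window slice comparison by a Rabin-Karp style rolling-fingerprint
-- filter (sum of character codes), comparing a window only when fingerprints agree.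

-- ===== PORT A =====
-- the 'for i in range(m - n + 1): if lower_main[i:i+n] == lower_sub: return True, i' loop
def pvALoop (lm ls : List String) : List Int → Bool × Int
  | [] => (false, -1)
  | i :: rest =>
    if PySem.List.slice lm (some i) (some (i + (ls.length : Int))) = ls then (true, i)
    else pvALoop lm ls rest

def is_sublist_case_insensitive (main_list : List String) (sub_list : List String) : Bool × Int :=
  let lower_main := main_list.map PySem.Str.lower
  let lower_sub := sub_list.map PySem.Str.lower
  let m : Int := lower_main.length
  let n : Int := lower_sub.length
  pvALoop lower_main lower_sub (PySem.List.pyRange 0 (m - n + 1) 1)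

-- ===== PORT B =====
-- sum(map(ord, item)) : the fingerprint of one element
def pvOrdSum (s : String) : Int := (s.toList.map (fun c => (c.toNat : Int))).sum

-- the 'for i in range(m - n + 1): …' loop of B, carrying the rolling window fingerprint;
-- fp[i+n] and fp[i] are read via pyGet?/getD 0 — in range at every call site (guard i+n<m, i≥0)
def pvBLoop (main : List String) (fp : List Int) (sub : List String) (target n m : Int) :
    List Int → Int → Bool × Int
  | [], _ => (false, -1)
  | i :: rest, w =>
    if w = target ∧ PySem.List.slice main (some i) (some (i + n)) = sub then (true, i)
    else pvBLoop main fp sub target n m rest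
      (if i + n < m then w + (PySem.List.pyGet? fp (i + n)).getD 0 - (PySem.List.pyGet? fp i).getD 0
       else w)

def is_sublist_case_insensitive_alt (main_list : List String) (sub_list : List String) : Bool × Int :=
  let main := main_list.map PySem.Str.lower
  let sub := sub_list.map PySem.Str.lower
  let m : Int := main.length
  let n : Int := sub.length
  let fp := main.map pvOrdSum
  let target := (sub.map pvOrdSum).sum
  let window := (PySem.List.slice fp none (some n)).sum
  pvBLoop main fp sub target n m (PySem.List.pyRange 0 (m - n + 1) 1) window

-- ===== PRECONDITION & SPEC =====
def Spec_is_sublist_case_insensitive (main_list : List String) (sub_list : List String) (out : Bool × Int) : Prop := out = is_sublist_case_insensitive_alt main_list sub_list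
instance (main_list : List String) (sub_list : List String) (out : Bool × Int) : Decidable (Spec_is_sublist_case_insensitive main_list sub_list out) := by unfold Spec_is_sublist_case_insensitive; infer_instance

-- ===== CLAIM (what is proved, stated in full; the proofs are below) =====
def Claim_equal_is_sublist_case_insensitive : Prop := ∀ (main_list : List String) (sub_list : List String), Dom_is_sublist_case_insensitive main_list sub_list → Spec_is_sublist_case_insensitive main_list sub_list (is_sublist_case_insensitive main_list sub_list)

-- ===== LEMMAS AND PROOFS =====

-- first-match scan, abstracted over the match test: common form of both loops
def pvFirst (p : Int → Prop) [DecidablePred p] : List Int → Bool × Int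
  | [] => (false, -1)
  | i :: rest => if p i then (true, i) else pvFirst p rest

-- casts a list of Nat indices to Int (keeps the elaborator from mangling the coercion)
def pvCastL (L : List Nat) : List Int := L.map Int.ofNat

-- fingerprint sum of the window of length n starting at a
def pvWin (fp : List Int) (n a : Nat) : Int := ((fp.drop a).take n).sum

theorem pvALoop_eq (lm ls : List String) (L : List Int) :
    pvALoop lm ls L
      = pvFirst (fun i => PySem.List.slice lm (some i) (some (i + (ls.length : Int))) = ls) L := by
  induction L with
  | nil => rfl
  | cons i rest ih => rw [pvALoop, pvFirst, ih]

-- a matching window forces fingerprint equality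
theorem pvWin_of_slice (main sub : List String) (a : Nat)
    (h : PySem.List.slice main (some (a : Int)) (some ((a : Int) + (sub.length : Int))) = sub) :
    pvWin (main.map pvOrdSum) sub.length a = (sub.map pvOrdSum).sum := by
  rw [PySem.List.slice_natCast_add] at h
  unfold pvWin
  rw [← List.map_drop, ← List.map_take, h]

-- rolling update of the window fingerprint
theorem pvWin_update (fp : List Int) (n a : Nat) (h : a + n < fp.length) :
    pvWin fp n a + fp.getD (a + n) 0 - fp.getD a 0 = pvWin fp n (a + 1) := by
  cases n with
  | zero => simp [pvWin]
  | succ k =>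
    have ha : a < fp.length := by omega
    have hd : fp.drop a = fp[a] :: fp.drop (a + 1) := List.drop_eq_getElem_cons ha
    have hk : k < (fp.drop (a + 1)).length := by simp; omega
    have ht : (fp.drop (a + 1)).take (k + 1)
        = (fp.drop (a + 1)).take k ++ [(fp.drop (a + 1))[k]] := by
      rw [List.take_add_one, List.getElem?_eq_getElem hk]; rfl
    have hg : (fp.drop (a + 1))[k] = fp[a + 1 + k]'(by omega) := by
      rw [List.getElem_drop]
    have h1 : fp.getD (a + (k + 1)) 0 = fp[a + 1 + k]'(by omega) := by
      rw [List.getD_eq_getElem _ _ (by omega)]; congr 1; omega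
    have h2 : fp.getD a 0 = fp[a] := List.getD_eq_getElem _ _ ha
    unfold pvWin
    rw [hd, List.take_succ_cons, ht, hg, h1, h2]
    simp; ring

theorem pvBLoop_eq (main sub : List String) (k a : Nat) (w : Int)
    (hw : w = pvWin (main.map pvOrdSum) sub.length a)
    (hk : a + k + sub.length ≤ main.length + 1) :
    pvBLoop main (main.map pvOrdSum) sub ((sub.map pvOrdSum).sum)
        (sub.length : Int) (main.length : Int)
        (pvCastL (List.range' a k)) w
      = pvFirst (fun i => PySem.List.slice main (some i) (some (i + (sub.length : Int))) = sub)
        (pvCastL (List.range' a k)) := by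
  induction k generalizing a w with
  | zero => rfl
  | succ k ih =>
    rw [List.range'_succ, pvCastL, List.map_cons, Int.ofNat_eq_natCast, ← pvCastL,
      pvBLoop, pvFirst]
    by_cases hs : PySem.List.slice main (some (a : Int)) (some ((a : Int) + (sub.length : Int))) = sub
    · have htgt : w = (sub.map pvOrdSum).sum := by
        rw [hw, pvWin_of_slice main sub a hs]
      rw [if_pos ⟨htgt, hs⟩, if_pos hs]
    · rw [if_neg (fun hc => hs hc.2), if_neg hs]
      by_cases hin : (a : Int) + (sub.length : Int) < (main.length : Int)
      · rw [if_pos hin]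
        have hlt : a + sub.length < main.length := by exact_mod_cast hin
        have hcast : (a : Int) + (sub.length : Int) = ((a + sub.length : Nat) : Int) := by
          push_cast; ring
        have hfl : a + sub.length < (main.map pvOrdSum).length := by simpa using hlt
        have hal : a < (main.map pvOrdSum).length := by simp; omega
        rw [hcast, PySem.List.pyGet?_natCast, PySem.List.pyGet?_natCast,
          List.getElem?_eq_getElem hfl, List.getElem?_eq_getElem hal]
        have : w + (main.map pvOrdSum)[a + sub.length] - (main.map pvOrdSum)[a]
            = pvWin (main.map pvOrdSum) sub.length (a + 1) := by
          rw [hw, ← pvWin_update _ _ _ hfl,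
            List.getD_eq_getElem _ _ hfl, List.getD_eq_getElem _ _ hal]
        exact ih (a + 1) _ this (by omega)
      · rw [if_neg hin]
        have hge : main.length ≤ a + sub.length := by
          have := not_lt.mp hin; exact_mod_cast this
        have hk0 : k = 0 := by omega
        subst hk0; rfl

-- ===== VERDICT (by name: the statement is the Claim_ definition above) =====
theorem is_sublist_case_insensitive_spec : Claim_equal_is_sublist_case_insensitive := by
  intro main_list sub_list _dom
  unfold Spec_is_sublist_case_insensitive is_sublist_case_insensitive is_sublist_case_insensitive_alt
  set main := main_list.map PySem.Str.lower with hmain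
  set sub := sub_list.map PySem.Str.lower with hsub
  simp only
  by_cases hnm : sub.length ≤ main.length + 1
  · have hrange : PySem.List.pyRange 0 ((main.length : Int) - (sub.length : Int) + 1) 1
        = pvCastL (List.range' 0 (main.length + 1 - sub.length)) := by
      rw [PySem.List.pyRange_one]
      have h1 : ((main.length : Int) - (sub.length : Int) + 1 - 0).toNat
          = main.length + 1 - sub.length := by omega
      rw [h1, List.range_eq_range']
      simp [pvCastL]
    have hwin : (PySem.List.slice (main.map pvOrdSum) none (some (sub.length : Int))).sum
        = pvWin (main.map pvOrdSum) sub.length 0 := by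
      rw [PySem.List.slice_to_natCast]; rfl
    rw [hrange, hwin, pvALoop_eq,
      pvBLoop_eq main sub (main.length + 1 - sub.length) 0 _ rfl (by omega)]
  · have hnil : PySem.List.pyRange 0 ((main.length : Int) - (sub.length : Int) + 1) 1 = [] := by
      apply PySem.List.pyRange_one_eq_nil; omega
    rw [hnil]; rfl
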